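-- pv_equiv track=rewrite | github.com/mazadegan/snc2fst | src/snc2fst/nc.py | matching_segments
-- ===== SOURCE A (Python) =====
-- def matching_segments(
--     alphabet: dict[str, dict[str, str]],
--     bundle: list[tuple[str, str]],
-- ) -> list[str]:
--     matches: list[str] = []
--     for segment, features in alphabet.items():
--         if all(features.get(feature) == sign for sign, feature in bundle):
--             matches.append(segment)
--     return matches
-- ===== SOURCE B (Python) =====
-- def matching_segments(
--     alphabet: dict[str, dict[str, str]],
--     bundle: list[tuple[str, str]],
-- ) -> list[str]:
--     # Narrow a candidate list one constraint at a time (instead of A's single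
--     # pass testing each segment against all constraints via all()), then
--     # project the surviving segment names.
--     def keep(sign, feature, cands):
--         kept = []
--         for s, f in cands:
--             if f.get(feature) == sign:
--                 kept.append((s, f))
--         return kept
--
--     def names(cands):
--         out = []
--         for s, _ in cands:
--             out.append(s)
--         return out
--
--     candidates = list(alphabet.items())
--     for sign, feature in bundle:
--         candidates = keep(sign, feature, candidates)
--     return names(candidates)
-- ===== Notes on version B (the rewrite author's own statement) =====
-- stated objective: alternative
-- what changed: B replaces A's single accumulator pass over segments (each tested against all constraints via all()) with structural recursion: it narrows a candidate list one constraint at a time via a recursive keep/narrow decomposition and finally projects the surviving names.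
import Mathlib
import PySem

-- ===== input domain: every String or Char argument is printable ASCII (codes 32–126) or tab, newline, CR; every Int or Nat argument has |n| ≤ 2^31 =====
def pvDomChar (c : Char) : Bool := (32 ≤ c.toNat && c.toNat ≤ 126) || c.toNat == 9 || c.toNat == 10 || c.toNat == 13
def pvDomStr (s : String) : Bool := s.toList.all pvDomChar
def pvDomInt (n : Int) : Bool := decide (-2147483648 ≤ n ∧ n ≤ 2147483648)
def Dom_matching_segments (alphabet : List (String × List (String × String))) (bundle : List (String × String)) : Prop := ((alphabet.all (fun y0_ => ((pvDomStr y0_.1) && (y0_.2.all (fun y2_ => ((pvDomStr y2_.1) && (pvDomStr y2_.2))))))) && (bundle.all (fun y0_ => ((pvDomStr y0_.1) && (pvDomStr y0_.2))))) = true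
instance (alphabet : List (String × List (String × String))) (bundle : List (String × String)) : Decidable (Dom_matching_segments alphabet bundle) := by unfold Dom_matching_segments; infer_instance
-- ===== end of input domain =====

-- B restructures A's single accumulator pass (each segment tested against all
-- constraints) into structural recursion narrowing the candidate list one
-- constraint at a time; same values, same order — objective: alternative.

-- ===== PORT A =====
-- A: one pass over segments, each appended iff every (sign, feature) constraint holds.
def matching_segments (alphabet : List (String × List (String × String))) (bundle : List (String × String)) : List String :=
  alphabet.foldl
    (fun macc p =>
      if bundle.all (fun sf => (PySem.Dict.mk p.2).get? sf.2 == some sf.1) then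
        macc ++ [p.1]
      else macc) []

-- ===== PORT B =====
-- keep: recursive filter of candidates satisfying one (sign, feature) constraint
def msKeep (sign feature : String) : List (String × List (String × String)) → List (String × List (String × String))
  | [] => []
  | p :: rest =>
      let tail := msKeep sign feature rest
      match (PySem.Dict.mk p.2).get? feature with
      | some v => if v = sign then p :: tail else tail
      | none => tail

-- names: recursive projection of the segment names
def msNames : List (String × List (String × String)) → List String
  | [] => []
  | p :: rest => p.1 :: msNames rest

-- narrow: recursion on the remaining constraints, shrinking the candidate list
def msNarrow (cands : List (String × List (String × String))) : List (String × String) → List String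
  | [] => msNames cands
  | sf :: rest => msNarrow (msKeep sf.1 sf.2 cands) rest

def matching_segments_alt (alphabet : List (String × List (String × String))) (bundle : List (String × String)) : List String :=
  msNarrow alphabet bundle

-- ===== PRECONDITION & SPEC =====
def Spec_matching_segments (alphabet : List (String × List (String × String))) (bundle : List (String × String)) (out : List String) : Prop := out = matching_segments_alt alphabet bundle
instance (alphabet : List (String × List (String × String))) (bundle : List (String × String)) (out : List String) : Decidable (Spec_matching_segments alphabet bundle out) := by unfold Spec_matching_segments; infer_instance

-- ===== CLAIM (what is proved, stated in full; the proofs are below) =====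
def Claim_equal_matching_segments : Prop := ∀ (alphabet : List (String × List (String × String))) (bundle : List (String × String)), Dom_matching_segments alphabet bundle → Spec_matching_segments alphabet bundle (matching_segments alphabet bundle)

-- ===== LEMMAS AND PROOFS =====

theorem msKeep_eq_filter (sign feature : String) (l : List (String × List (String × String))) :
    msKeep sign feature l
      = l.filter (fun p => (PySem.Dict.mk p.2).get? feature == some sign) := by
  induction l with
  | nil => rfl
  | cons p rest ih =>
      simp only [msKeep, ih, List.filter_cons]
      cases h : (PySem.Dict.mk p.2).get? feature with
      | none => simp [h]
      | some v => by_cases hv : v = sign <;> simp [h, hv]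

theorem msNames_eq_map (l : List (String × List (String × String))) :
    msNames l = l.map Prod.fst := by
  induction l with
  | nil => rfl
  | cons p rest ih => simp [msNames, ih]

theorem msNarrow_eq (b : List (String × String)) :
    ∀ (l : List (String × List (String × String))),
      msNarrow l b
        = (l.filter (fun p => b.all (fun sf => (PySem.Dict.mk p.2).get? sf.2 == some sf.1))).map Prod.fst := by
  induction b with
  | nil => intro l; simp [msNarrow, msNames_eq_map]
  | cons sf rest ih =>
      intro l
      simp only [msNarrow, ih, msKeep_eq_filter, List.filter_filter, List.all_cons]
      congr 1
      apply List.filter_congr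
      intro p _
      rw [Bool.and_comm]

theorem foldl_append_if_eq_filter_map {α β : Type} (q : α → Bool) (f : α → β) :
    ∀ (l : List α) (acc : List β),
      l.foldl (fun m p => if q p then m ++ [f p] else m) acc
        = acc ++ (l.filter q).map f := by
  intro l
  induction l with
  | nil => intro acc; simp
  | cons x xs ih =>
      intro acc
      simp only [List.foldl_cons, ih, List.filter_cons]
      by_cases h : q x <;> simp [h]

-- ===== VERDICT (by name: the statement is the Claim_ definition above) =====
theorem matching_segments_spec : Claim_equal_matching_segments := by
  intro alphabet bundle _
  unfold Spec_matching_segments matching_segments matching_segments_alt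
  rw [foldl_append_if_eq_filter_map, msNarrow_eq]
  simp
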